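-- pv_equiv track=rewrite | github.com/Sicambr/Dani_ap | block_macker.py | read_paramtext
-- ===== SOURCE A (Python) =====
-- def read_paramtext(my_param, text):
--     letters = 'XYZRQF'
--     numbers = '-.0123456789'
--     stroka_p = ''
--     i = 0
--     while i < len(text):
--         if text[i] in letters:
--             stroka_p = text[i]
--             j = i + 1
--             while j < len(text):
--                 if text[j] in numbers:
--                     stroka_p = stroka_p + text[j]
--                 else:
--                     i = j - 1
--                     break
--                 j += 1
--             my_param[stroka_p[0]] = stroka_p[1:]
--         i += 1
--     return my_param
-- ===== SOURCE B (Python) =====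
-- def read_paramtext(my_param, text):
--     # One-pass state machine: carry (key, buf) instead of index arithmetic.
--     letters = 'XYZRQF'
--     numbers = '-.0123456789'
--     key = None
--     buf = ''
--     for ch in text:
--         if ch in letters:
--             if key is not None:
--                 my_param[key] = buf
--             key, buf = ch, ''
--         elif key is not None and ch in numbers:
--             buf += ch
--         else:
--             if key is not None:
--                 my_param[key] = buf
--             key, buf = None, ''
--     if key is not None:
--         my_param[key] = buf
--     return my_param
-- ===== Notes on version B (the rewrite author's own statement) =====
-- stated objective: simpler
-- what changed: Replaced A's nested while loops with manual index arithmetic (inner scan plus the i = j - 1 back-off) by a single left-to-right pass carrying a pending (key, buffer) state that is flushed into the dict at the next letter, non-numeric character, or end of text.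
import Mathlib
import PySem

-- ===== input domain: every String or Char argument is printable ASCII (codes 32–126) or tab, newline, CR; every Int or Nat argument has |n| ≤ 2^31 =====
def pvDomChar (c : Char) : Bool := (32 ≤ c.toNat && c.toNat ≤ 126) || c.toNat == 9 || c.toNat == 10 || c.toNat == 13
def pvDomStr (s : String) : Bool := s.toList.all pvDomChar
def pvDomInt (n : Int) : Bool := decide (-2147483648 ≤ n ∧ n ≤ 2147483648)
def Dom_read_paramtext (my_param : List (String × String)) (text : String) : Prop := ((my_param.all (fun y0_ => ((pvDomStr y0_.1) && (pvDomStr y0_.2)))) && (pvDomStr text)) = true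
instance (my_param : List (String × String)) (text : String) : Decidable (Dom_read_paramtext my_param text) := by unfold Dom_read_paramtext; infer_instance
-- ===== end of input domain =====

-- B replaces A's nested index loops (with the i = j - 1 back-off) by a single left-to-right
-- state machine carrying the pending (key, buffer); same return value, and both mutate the
-- my_param dict identically (equality proved on the returned dict's items).

-- ===== PORT A =====
-- letters = 'XYZRQF', numbers = '-.0123456789' (as character lists)
def pvLetters : List Char := ['X', 'Y', 'Z', 'R', 'Q', 'F']
def pvNumbers : List Char := ['-', '.', '0', '1', '2', '3', '4', '5', '6', '7', '8', '9']
def readA_inner (cs : List Char) (j : Nat) (stroka : List Char) (i : Nat) : List Char × Nat :=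
  if h : j < cs.length then
    if pvNumbers.contains cs[j] then readA_inner cs (j + 1) (stroka ++ [cs[j]]) i
    else (stroka, j - 1)
  else (stroka, i)
termination_by cs.length - j

theorem readA_inner_ge (cs : List Char) (j : Nat) (stroka : List Char) (i : Nat)
    (hj : i + 1 ≤ j) : i ≤ (readA_inner cs j stroka i).2 := by
  fun_induction readA_inner cs j stroka i with
  | case1 j s h hnum ih => exact ih (by omega)
  | case2 j s h hnum => simp; omega
  | case3 j s h => simp

def readA_outer (cs : List Char) (i : Nat) (d : PySem.Dict String String) :
    PySem.Dict String String :=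
  if h : i < cs.length then
    if pvLetters.contains cs[i] then
      let p := readA_inner cs (i + 1) [cs[i]] i
      readA_outer cs (p.2 + 1) (d.insert (String.ofList (p.1.take 1)) (String.ofList (p.1.drop 1)))
    else readA_outer cs (i + 1) d
  else d
termination_by cs.length - i
decreasing_by
  · have := readA_inner_ge cs (i + 1) [cs[i]] i (by omega); omega
  · omega

def read_paramtext (my_param : List (String × String)) (text : String) : List (String × String) :=
  (readA_outer text.toList 0 (PySem.Dict.ofList my_param)).items

-- ===== PORT B =====
def readB_flush (d : PySem.Dict String String) (st : Option (Char × List Char)) :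
    PySem.Dict String String :=
  match st with
  | none => d
  | some (k, buf) => d.insert (String.ofList [k]) (String.ofList buf)

def readB_step (s : PySem.Dict String String × Option (Char × List Char)) (ch : Char) :
    PySem.Dict String String × Option (Char × List Char) :=
  if pvLetters.contains ch then (readB_flush s.1 s.2, some (ch, []))
  else
    match s.2 with
    | some (k, buf) =>
        if pvNumbers.contains ch then (s.1, some (k, buf ++ [ch]))
        else (readB_flush s.1 (some (k, buf)), none)
    | none => (s.1, none)

def read_paramtext_alt (my_param : List (String × String)) (text : String) :
    List (String × String) :=
  let s := text.toList.foldl readB_step (PySem.Dict.ofList my_param, none)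
  (readB_flush s.1 s.2).items

-- ===== PRECONDITION & SPEC =====
def Spec_read_paramtext (my_param : List (String × String)) (text : String) (out : List (String × String)) : Prop := out = read_paramtext_alt my_param text
instance (my_param : List (String × String)) (text : String) (out : List (String × String)) : Decidable (Spec_read_paramtext my_param text out) := by unfold Spec_read_paramtext; infer_instance

-- ===== CLAIM (what is proved, stated in full; the proofs are below) =====
def Claim_equal_read_paramtext : Prop := ∀ (my_param : List (String × String)) (text : String), Dom_read_paramtext my_param text → Spec_read_paramtext my_param text (read_paramtext my_param text)

-- ===== LEMMAS AND PROOFS =====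

def pvRun (l : List Char) : List Char := l.takeWhile (fun x => pvNumbers.contains x)

def pvGo (cs : List Char) (d : PySem.Dict String String) : PySem.Dict String String :=
  match cs with
  | [] => d
  | c :: rest =>
    if pvLetters.contains c then
      pvGo (rest.drop (pvRun rest).length) (d.insert (String.ofList [c]) (String.ofList (pvRun rest)))
    else pvGo rest d
termination_by cs.length
decreasing_by
  · simp only [List.length_drop, List.length_cons]; omega
  · simp

theorem pv_disjoint : ∀ c ∈ pvNumbers, pvLetters.contains c = false := by
  intro c hc
  simp [pvNumbers] at hc
  rcases hc with h|h|h|h|h|h|h|h|h|h|h|h <;> subst h <;> decide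

theorem readA_inner_spec (cs : List Char) (j : Nat) (s : List Char) (i : Nat)
    (hj : j ≤ cs.length) :
    readA_inner cs j s i =
      (s ++ pvRun (cs.drop j),
       if j + (pvRun (cs.drop j)).length < cs.length
       then j + (pvRun (cs.drop j)).length - 1 else i) := by
  fun_induction readA_inner cs j s i with
  | case1 j s h hnum ih =>
      have hdrop : cs.drop j = cs[j] :: cs.drop (j + 1) :=
        List.drop_eq_getElem_cons h
      rw [ih (by omega), hdrop]
      simp only [pvRun, List.takeWhile_cons, hnum, if_true, List.length_cons, Prod.mk.injEq]
      constructor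
      · simp
      · split_ifs <;> omega
  | case2 j s h hnum =>
      have hdrop : cs.drop j = cs[j] :: cs.drop (j + 1) :=
        List.drop_eq_getElem_cons h
      have hn : pvNumbers.contains cs[j] = false := by simpa using hnum
      rw [hdrop]
      simp only [pvRun, List.takeWhile_cons, hn]
      simp [h]
  | case3 j s h =>
      have hd : cs.drop j = [] := List.drop_eq_nil_of_le (by omega)
      simp [hd, h, pvRun]

theorem readA_outer_skip (cs : List Char) (i : Nat) (d : PySem.Dict String String)
    (h : ∀ c ∈ cs.drop i, pvLetters.contains c = false) : readA_outer cs i d = d := by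
  fun_induction readA_outer cs i d with
  | case1 i d hlt hlet p =>
      exfalso
      have hm : cs[i] ∈ cs.drop i := by
        rw [List.drop_eq_getElem_cons hlt]
        exact List.mem_cons_self ..
      have := h _ hm
      simp at this
      exact this (by simpa using hlet)
  | case2 i d hlt hlet ih =>
      apply ih
      intro c hc
      apply h
      rw [List.drop_eq_getElem_cons hlt]
      exact List.mem_cons_of_mem _ hc
  | case3 i d h => rfl

theorem readA_outer_eq_pvGo (cs : List Char) (i : Nat) (d : PySem.Dict String String) :
    readA_outer cs i d = pvGo (cs.drop i) d := by
  fun_induction readA_outer cs i d with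
  | case1 i d hlt hlet p =>
      rename_i ih
      have hdrop : cs.drop i = cs[i] :: cs.drop (i + 1) := List.drop_eq_getElem_cons hlt
      have hp : p = ([cs[i]] ++ pvRun (cs.drop (i + 1)),
          if i + 1 + (pvRun (cs.drop (i + 1))).length < cs.length
          then i + 1 + (pvRun (cs.drop (i + 1))).length - 1 else i) :=
        readA_inner_spec cs (i + 1) [cs[i]] i (by omega)
      rw [hdrop, pvGo, if_pos hlet]
      rw [hp] at ih ⊢
      simp only [List.singleton_append, List.take_succ_cons, List.take_zero,
        List.drop_succ_cons, List.drop_zero] at ih ⊢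
      by_cases hb : i + 1 + (pvRun (cs.drop (i + 1))).length < cs.length
      · rw [if_pos hb] at ih ⊢
        have e1 : i + 1 + (pvRun (cs.drop (i + 1))).length - 1 + 1
            = i + 1 + (pvRun (cs.drop (i + 1))).length := by omega
        rw [e1] at ih ⊢
        rw [ih, List.drop_drop]
      · rw [if_neg hb] at ih ⊢
        have hlen : (cs.drop (i + 1)).length ≤ (pvRun (cs.drop (i + 1))).length := by
          have := List.length_drop (l := cs) (i := i + 1)
          omega
        have hreq : pvRun (cs.drop (i + 1)) = cs.drop (i + 1) := by
          have hpre : pvRun (cs.drop (i + 1)) <+: cs.drop (i + 1) := List.takeWhile_prefix _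
          exact hpre.eq_of_length (le_antisymm hpre.length_le hlen)
        have hnl : ∀ c ∈ cs.drop (i + 1), pvLetters.contains c = false := by
          intro c hc
          apply pv_disjoint
          rw [← hreq] at hc
          simpa using List.mem_takeWhile_imp hc
        rw [readA_outer_skip cs (i + 1) _ hnl]
        have hnil : (cs.drop (i + 1)).drop (pvRun (cs.drop (i + 1))).length = [] := by
          apply List.drop_eq_nil_of_le
          omega
        rw [hnil, pvGo]
  | case2 i d hlt hlet ih =>
      have hdrop : cs.drop i = cs[i] :: cs.drop (i + 1) := List.drop_eq_getElem_cons hlt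
      rw [hdrop, pvGo, if_neg (by simpa using hlet)]
      exact ih
  | case3 i d h =>
      have : cs.drop i = [] := List.drop_eq_nil_of_le (by omega)
      rw [this, pvGo]

theorem readB_fold_eq_pvGo (cs : List Char) :
    (∀ d, (let s := cs.foldl readB_step (d, none); readB_flush s.1 s.2) = pvGo cs d) ∧
    (∀ d k buf,
      (let s := cs.foldl readB_step (d, some (k, buf)); readB_flush s.1 s.2) =
        pvGo (cs.drop (pvRun cs).length)
          (d.insert (String.ofList [k]) (String.ofList (buf ++ pvRun cs)))) := by
  induction cs with
  | nil =>
    refine ⟨fun d => by simp [pvGo, readB_flush], fun d k buf => ?_⟩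
    simp [pvGo, pvRun, readB_flush]
  | cons c rest ih =>
    constructor
    · intro d
      simp only [List.foldl_cons]
      by_cases hl : pvLetters.contains c
      · have hml : c ∈ pvLetters := by simpa using hl
        rw [show readB_step (d, none) c = (d, some (c, [])) by
          simp [readB_step, readB_flush, hml]]
        have h2 := ih.2 d c []
        simp only at h2
        rw [h2, pvGo, if_pos hl]
        simp
      · have hml : c ∉ pvLetters := by simpa using hl
        rw [show readB_step (d, none) c = (d, none) by simp [readB_step, hml]]
        have h1 := ih.1 d
        simp only at h1
        rw [h1, pvGo, if_neg (by simpa using hl)]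
    · intro d k buf
      simp only [List.foldl_cons]
      by_cases hl : pvLetters.contains c
      · have hnn : pvNumbers.contains c = false := by
          by_contra hc
          have hm : c ∈ pvNumbers := by
            rw [Bool.not_eq_false] at hc
            simpa using hc
          have := pv_disjoint c hm
          rw [this] at hl
          exact absurd hl (by simp)
        have hml : c ∈ pvLetters := by simpa using hl
        rw [show readB_step (d, some (k, buf)) c =
            (d.insert (String.ofList [k]) (String.ofList buf), some (c, [])) by
          simp [readB_step, readB_flush, hml]]
        have h2 := ih.2 (d.insert (String.ofList [k]) (String.ofList buf)) c []
        simp only at h2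
        rw [h2]
        simp only [pvRun, List.takeWhile_cons, hnn, Bool.false_eq_true, if_false,
          List.length_nil, List.drop_zero, List.append_nil, List.nil_append]
        rw [pvGo, if_pos hl]
        simp only [pvRun]
      · by_cases hn : pvNumbers.contains c
        · have hml : c ∉ pvLetters := by simpa using hl
          have hmn : c ∈ pvNumbers := by simpa using hn
          rw [show readB_step (d, some (k, buf)) c = (d, some (k, buf ++ [c])) by
            simp [readB_step, hml, hmn]]
          have h2 := ih.2 d k (buf ++ [c])
          simp only at h2
          rw [h2]
          simp only [pvRun, List.takeWhile_cons, hn, if_true, List.length_cons,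
            List.drop_succ_cons, List.append_assoc, List.singleton_append]
        · have hml : c ∉ pvLetters := by simpa using hl
          have hmn : c ∉ pvNumbers := by simpa using hn
          rw [show readB_step (d, some (k, buf)) c =
              (d.insert (String.ofList [k]) (String.ofList buf), none) by
            simp [readB_step, readB_flush, hml, hmn]]
          have h1 := ih.1 (d.insert (String.ofList [k]) (String.ofList buf))
          simp only at h1
          rw [h1]
          have hnn2 : pvNumbers.contains c = false := by simpa using hn
          simp only [pvRun, List.takeWhile_cons, hnn2, Bool.false_eq_true, if_false,
            List.length_nil, List.drop_zero, List.append_nil]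
          rw [pvGo, if_neg (by simpa using hl)]

-- ===== VERDICT (by name: the statement is the Claim_ definition above) =====
theorem read_paramtext_spec : Claim_equal_read_paramtext := by
  intro my_param text _
  unfold Spec_read_paramtext read_paramtext read_paramtext_alt
  rw [readA_outer_eq_pvGo]
  simp only [List.drop_zero]
  rw [← (readB_fold_eq_pvGo text.toList).1 (PySem.Dict.ofList my_param)]
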